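-- pv_equiv track=rewrite | github.com/Harshini-19-git/2201MC57_CS384_2024 | tut06.py | SpChar
-- ===== SOURCE A (Python) =====
-- def SpChar(s):
--     ct = 0
--     for i in s:
--         if i in ('!', '@', '#'):
--             ct += 1
--         elif 'A' <= i <= 'Z' or 'a' <= i <= 'z' or '0' <= i <= '9':
--             continue
--         else:
--             return 'Falsechar'
--     if ct > 0:
--         return 'True'
--     else:
--         return 'NoSpChar'
-- ===== SOURCE B (Python) =====
-- def SpChar(s):
--     cs = set(s)
--     specials = cs & {'!', '@', '#'}
--     others = cs - specials
--     if any(not ('A' <= c <= 'Z' or 'a' <= c <= 'z' or '0' <= c <= '9') for c in others):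
--         return 'Falsechar'
--     return 'True' if specials else 'NoSpChar'
-- ===== Notes on version B (the rewrite author's own statement) =====
-- stated objective: alternative
-- what changed: Replaces the per-character counting loop with early return by set operations: deduplicate s into a set, split off the special characters with set intersection/difference, then test the remainder for any non-alphanumeric character.
import Mathlib
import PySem

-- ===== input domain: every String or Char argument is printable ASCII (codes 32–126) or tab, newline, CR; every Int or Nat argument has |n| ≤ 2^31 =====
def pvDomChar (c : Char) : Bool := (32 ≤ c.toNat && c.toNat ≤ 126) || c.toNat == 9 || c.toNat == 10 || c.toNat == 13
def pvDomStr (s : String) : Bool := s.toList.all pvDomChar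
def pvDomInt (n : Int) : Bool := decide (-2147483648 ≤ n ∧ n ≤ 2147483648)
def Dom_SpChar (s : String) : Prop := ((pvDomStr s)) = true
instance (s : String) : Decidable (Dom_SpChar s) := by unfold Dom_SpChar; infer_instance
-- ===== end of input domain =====

-- B replaces A's counting loop with set operations (dedup, intersection with the specials, difference); same cost, alternative structure.

-- ===== PORT A =====
-- A's for-loop with the counter ct and two early-return branches, step for step.
def SpCharLoop : List Char → Nat → String
  | [], ct => if ct > 0 then "True" else "NoSpChar"
  | i :: rest, ct =>
    if i = '!' ∨ i = '@' ∨ i = '#' then SpCharLoop rest (ct + 1)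
    else if ('A' ≤ i ∧ i ≤ 'Z') ∨ ('a' ≤ i ∧ i ≤ 'z') ∨ ('0' ≤ i ∧ i ≤ '9') then SpCharLoop rest ct
    else "Falsechar"

def SpChar (s : String) : String := SpCharLoop s.toList 0

-- ===== PORT B =====
def pyIsAlnum (c : Char) : Bool :=
  ('A' ≤ c && c ≤ 'Z') || ('a' ≤ c && c ≤ 'z') || ('0' ≤ c && c ≤ '9')

def SpChar_alt (s : String) : String :=
  let cs : PySem.Set Char := PySem.Set.ofList s.toList
  let specials : PySem.Set Char := PySem.Set.inter cs ['!', '@', '#']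
  let others : PySem.Set Char := PySem.Set.diff cs specials
  if others.any (fun c => !(pyIsAlnum c)) then "Falsechar"
  else if !specials.isEmpty then "True" else "NoSpChar"

-- ===== PRECONDITION & SPEC =====
def Spec_SpChar (s : String) (out : String) : Prop := out = SpChar_alt s
instance (s : String) (out : String) : Decidable (Spec_SpChar s out) := by unfold Spec_SpChar; infer_instance

-- ===== CLAIM (what is proved, stated in full; the proofs are below) =====
def Claim_equal_SpChar : Prop := ∀ (s : String), Dom_SpChar s → Spec_SpChar s (SpChar s)

-- ===== LEMMAS AND PROOFS =====

def pyIsSpecial (c : Char) : Bool := c = '!' || c = '@' || c = '#'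

lemma pyIsSpecial_iff (c : Char) : pyIsSpecial c = true ↔ c ∈ (['!', '@', '#'] : List Char) := by
  simp [pyIsSpecial, or_assoc]

-- Characterisation of A's loop: Falsechar iff some char is neither special nor alnum,
-- else True iff ct > 0 or some char is special.
lemma SpCharLoop_char (l : List Char) : ∀ ct : Nat,
    SpCharLoop l ct =
      if l.any (fun c => !(pyIsSpecial c) && !(pyIsAlnum c)) then "Falsechar"
      else if ct > 0 || l.any pyIsSpecial then "True" else "NoSpChar" := by
  induction l with
  | nil => intro ct; simp [SpCharLoop]
  | cons i rest ih =>
    intro ct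
    by_cases hs : i = '!' ∨ i = '@' ∨ i = '#'
    · have hs' : pyIsSpecial i = true := by
        rw [pyIsSpecial_iff]; simpa using hs
      simp [SpCharLoop, hs, ih, hs']
    · have hs' : pyIsSpecial i = false := by
        rw [Bool.eq_false_iff, Ne, pyIsSpecial_iff]; simpa using hs
      by_cases ha : ('A' ≤ i ∧ i ≤ 'Z') ∨ ('a' ≤ i ∧ i ≤ 'z') ∨ ('0' ≤ i ∧ i ≤ '9')
      · have ha' : pyIsAlnum i = true := by
          simp only [pyIsAlnum, Bool.or_eq_true, Bool.and_eq_true, decide_eq_true_eq]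
          exact or_assoc.mpr ha
        simp [SpCharLoop, hs, ha, ih, hs', ha']
      · have ha' : pyIsAlnum i = false := by
          rw [Bool.eq_false_iff]
          simp only [Ne, pyIsAlnum, Bool.or_eq_true, Bool.and_eq_true, decide_eq_true_eq]
          exact fun h => ha (or_assoc.mp h)
        simp [SpCharLoop, hs, ha, hs', ha']

-- B's "others" test equals A's invalid-char test, as an existence statement over s's chars.
lemma others_any (l : List Char) :
    (PySem.Set.diff (PySem.Set.ofList l)
        (PySem.Set.inter (PySem.Set.ofList l) ['!', '@', '#'])).any (fun c => !(pyIsAlnum c))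
      = l.any (fun c => !(pyIsSpecial c) && !(pyIsAlnum c)) := by
  rw [Bool.eq_iff_iff]
  simp only [List.any_eq_true, PySem.Set.mem_diff, PySem.Set.mem_inter, PySem.Set.mem_ofList,
    Bool.and_eq_true, Bool.not_eq_eq_eq_not, Bool.not_true, ← Bool.not_eq_true, pyIsSpecial_iff]
  constructor
  · rintro ⟨c, ⟨hc, hns⟩, hna⟩
    exact ⟨c, hc, fun hmem => hns ⟨hc, hmem⟩, hna⟩
  · rintro ⟨c, hc, hns, hna⟩
    exact ⟨c, ⟨hc, fun h => hns h.2⟩, hna⟩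

-- B's "specials" nonemptiness equals A's special-char test.
lemma specials_nonempty (l : List Char) :
    (!(PySem.Set.inter (PySem.Set.ofList l) ['!', '@', '#'] : List Char).isEmpty)
      = l.any pyIsSpecial := by
  rw [Bool.eq_iff_iff]
  simp only [Bool.not_eq_eq_eq_not, Bool.not_true, List.isEmpty_eq_false_iff_exists_mem,
    List.any_eq_true, PySem.Set.mem_inter, PySem.Set.mem_ofList, pyIsSpecial_iff]

-- ===== VERDICT (by name: the statement is the Claim_ definition above) =====
theorem SpChar_spec : Claim_equal_SpChar := by
  intro s _
  show SpChar s = SpChar_alt s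
  have hB : SpChar_alt s =
      (if (PySem.Set.diff (PySem.Set.ofList s.toList)
            (PySem.Set.inter (PySem.Set.ofList s.toList) ['!', '@', '#'])).any
              (fun c => !(pyIsAlnum c)) then "Falsechar"
       else if !(PySem.Set.inter (PySem.Set.ofList s.toList) ['!', '@', '#'] : List Char).isEmpty
            then "True" else "NoSpChar") := rfl
  rw [hB, others_any, specials_nonempty, SpChar, SpCharLoop_char]
  simp
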